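-- pv_equiv track=rewrite | github.com/picacat/pyMedical | libs/nhi_utils.py | extract_pharmacy_code
-- ===== SOURCE A (Python) =====
-- def extract_pharmacy_code(pharmacy_code_str):
--     pharmacy_count = 0
--     pharmacy_code = ''
--     for i in range(len(pharmacy_code_str)):
--         if pharmacy_code_str[i] in ['1', '2']:
--             pharmacy_code = 'A3{0}'.format(pharmacy_code_str[i])
--             pharmacy_count += 1
--
--         if pharmacy_count >= 2:
--             pharmacy_code = ''
--             break
--
--     return pharmacy_code
-- ===== SOURCE B (Python) =====
-- def extract_pharmacy_code(pharmacy_code_str):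
--     n1 = pharmacy_code_str.count('1')
--     n2 = pharmacy_code_str.count('2')
--     if n1 + n2 != 1:
--         return ''
--     return 'A31' if n1 else 'A32'
-- ===== Notes on version B (the rewrite author's own statement) =====
-- stated objective: alternative
-- what changed: Replaces A's stateful early-exit index loop (running count, code overwritten and cleared on a second hit) with pure counting arithmetic: two str.count calls, a branch on whether the total is exactly 1, and the result digit reconstructed from which count is nonzero instead of being read from the string.
import Mathlib
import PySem

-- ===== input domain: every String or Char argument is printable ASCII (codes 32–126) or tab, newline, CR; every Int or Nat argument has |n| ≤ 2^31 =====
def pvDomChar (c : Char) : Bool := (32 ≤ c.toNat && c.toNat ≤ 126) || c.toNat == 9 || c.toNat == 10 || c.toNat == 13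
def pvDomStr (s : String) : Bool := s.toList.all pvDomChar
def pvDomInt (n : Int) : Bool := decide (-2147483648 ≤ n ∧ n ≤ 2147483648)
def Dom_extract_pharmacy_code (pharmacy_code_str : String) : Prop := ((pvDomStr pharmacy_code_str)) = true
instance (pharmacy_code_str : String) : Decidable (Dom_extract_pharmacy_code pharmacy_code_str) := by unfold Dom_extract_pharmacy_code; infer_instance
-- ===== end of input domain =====

-- B replaces A's stateful early-exit character loop with counting arithmetic:
-- two str.count calls, a branch on the total, and the digit reconstructed from the
-- counts instead of being read from the string (objective: alternative).

-- ===== PORT A =====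
-- A's loop over indices, with running (pharmacy_count, pharmacy_code) state and the
-- early break ('') when a second match is found.
def pvLoopA : List Char → Int → String → String
  | [], _, code => code
  | c :: rest, cnt, code =>
    let cnt' := if c = '1' ∨ c = '2' then cnt + 1 else cnt
    let code' := if c = '1' ∨ c = '2' then String.ofList ['A', '3', c] else code
    if cnt' ≥ 2 then "" else pvLoopA rest cnt' code'

def extract_pharmacy_code (pharmacy_code_str : String) : String :=
  pvLoopA pharmacy_code_str.toList 0 ""

-- ===== PORT B =====
-- n1 = s.count('1'); n2 = s.count('2'); '' unless n1+n2 == 1, else 'A31' if n1 else 'A32'.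
def extract_pharmacy_code_alt (pharmacy_code_str : String) : String :=
  let n1 := PySem.Str.count pharmacy_code_str "1"
  let n2 := PySem.Str.count pharmacy_code_str "2"
  if n1 + n2 ≠ 1 then ""
  else if n1 ≠ 0 then "A31" else "A32"

-- ===== PRECONDITION & SPEC =====
def Spec_extract_pharmacy_code (pharmacy_code_str : String) (out : String) : Prop := out = extract_pharmacy_code_alt pharmacy_code_str
instance (pharmacy_code_str : String) (out : String) : Decidable (Spec_extract_pharmacy_code pharmacy_code_str out) := by unfold Spec_extract_pharmacy_code; infer_instance

-- ===== CLAIM (what is proved, stated in full; the proofs are below) =====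
def Claim_equal_extract_pharmacy_code : Prop := ∀ (pharmacy_code_str : String), Dom_extract_pharmacy_code pharmacy_code_str → Spec_extract_pharmacy_code pharmacy_code_str (extract_pharmacy_code pharmacy_code_str)

-- ===== LEMMAS AND PROOFS =====

-- Python's s.count(c) for a single character equals List.count (fuel-indexed go).
theorem pvCountGo_singleton (c : Char) :
    ∀ (fuel : Nat) (l : List Char) (acc : Nat), l.length ≤ fuel →
      PySem.Chars.count.go [c] fuel l acc = acc + l.count c := by
  intro fuel
  induction fuel with
  | zero =>
    intro l acc h
    have : l = [] := List.eq_nil_of_length_eq_zero (Nat.le_zero.mp h)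
    subst this
    simp [PySem.Chars.count.go]
  | succ n ih =>
    intro l acc h
    cases l with
    | nil => simp [PySem.Chars.count.go]
    | cons x t =>
      by_cases hx : x = c
      · subst hx
        have hp : List.isPrefixOf [x] (x :: t) = true := by simp [List.isPrefixOf]
        simp only [PySem.Chars.count.go, hp, if_pos]
        rw [show List.drop (List.length [x]) (x :: t) = t by simp]
        rw [ih t (acc + 1) (by simpa using Nat.lt_succ_iff.mp (by simpa using h))]
        simp
        omega
      · have hp : List.isPrefixOf [c] (x :: t) = false := by
          simp [List.isPrefixOf]
          exact fun he => absurd he.symm hx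
        simp only [PySem.Chars.count.go, hp]
        rw [ih t acc (by simpa using Nat.lt_succ_iff.mp (by simpa using h))]
        simp [hx]

theorem pvCount_singleton (l : List Char) (c : Char) :
    PySem.Chars.count l [c] = l.count c := by
  simp [PySem.Chars.count]
  simpa using pvCountGo_singleton c l.length l 0 (le_refl _)

-- Once one match has been found (count = 1, code = "A3"+d), A's loop returns that
-- code iff no further match occurs, else "".
theorem pvLoopA_one (l : List Char) (d : Char) :
    pvLoopA l 1 (String.ofList ['A', '3', d]) =
      if l.filter (fun c => c = '1' ∨ c = '2') = [] then String.ofList ['A', '3', d] else "" := by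
  induction l with
  | nil => simp [pvLoopA]
  | cons c rest ih =>
    by_cases h : c = '1' ∨ c = '2'
    · simp [pvLoopA, h]
    · simp [pvLoopA, h, ih]

-- A's loop from the initial state, characterised by the filtered matches.
theorem pvLoopA_zero (l : List Char) :
    pvLoopA l 0 "" =
      (match l.filter (fun c => c = '1' ∨ c = '2') with
       | [c] => String.ofList ['A', '3', c]
       | _ => "") := by
  induction l with
  | nil => simp [pvLoopA]
  | cons c rest ih =>
    by_cases h : c = '1' ∨ c = '2'
    · rcases hf : rest.filter (fun c => decide (c = '1') || decide (c = '2')) with _ | ⟨x, xs⟩ <;>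
        simp [pvLoopA, h, pvLoopA_one, hf]
    · simp [pvLoopA, h, ih]

-- The number of matches is the sum of the two character counts.
theorem pvFilter_length (l : List Char) :
    (l.filter (fun c => c = '1' ∨ c = '2')).length = l.count '1' + l.count '2' := by
  induction l with
  | nil => simp
  | cons c rest ih =>
    simp only [Bool.decide_or] at ih ⊢
    by_cases h1 : c = '1'
    · subst h1
      simp [ih]
      omega
    · by_cases h2 : c = '2'
      · subst h2
        simp [ih]
        omega
      · simp [h1, h2, ih]

-- ===== VERDICT (by name: the statement is the Claim_ definition above) =====
theorem extract_pharmacy_code_spec : Claim_equal_extract_pharmacy_code := by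
  intro s _
  unfold Spec_extract_pharmacy_code extract_pharmacy_code extract_pharmacy_code_alt
  have hc1 : PySem.Str.count s "1" = s.toList.count '1' := by
    simp [PySem.Str.count_eq]; simpa using pvCount_singleton s.toList '1'
  have hc2 : PySem.Str.count s "2" = s.toList.count '2' := by
    simp [PySem.Str.count_eq]; simpa using pvCount_singleton s.toList '2'
  rw [pvLoopA_zero, hc1, hc2]
  have hflen := pvFilter_length s.toList
  by_cases hsum : s.toList.count '1' + s.toList.count '2' = 1
  · obtain ⟨c, hc⟩ := List.length_eq_one_iff.mp (hflen.trans hsum)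
    have hmem : c ∈ s.toList.filter (fun c => c = '1' ∨ c = '2') := by rw [hc]; simp
    have hcp : c = '1' ∨ c = '2' := by simpa using List.of_mem_filter hmem
    have hcl : c ∈ s.toList := List.mem_of_mem_filter hmem
    rw [hc]
    rcases hcp with h | h
    · subst h
      have h1 : s.toList.count '1' ≠ 0 := by
        have := List.count_pos_iff.mpr hcl
        omega
      simp [hsum, h1]
    · subst h
      have h2 : s.toList.count '2' ≠ 0 := by
        have := List.count_pos_iff.mpr hcl
        omega
      have h1 : s.toList.count '1' = 0 := by omega
      have h2e : s.toList.count '2' = 1 := by omega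
      simp [h1, h2e]
  · have hne : (s.toList.filter (fun c => c = '1' ∨ c = '2')).length ≠ 1 := by omega
    rcases hf : s.toList.filter (fun c => c = '1' ∨ c = '2') with _ | ⟨c, _ | ⟨c2, rest2⟩⟩
    · simp [hsum]
    · rw [hf] at hne; simp at hne
    · simp [hsum]
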